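-- pv_equiv track=rewrite | github.com/VividNightmareUnleashed/vrcx-android | scripts/release_sign_and_scan.py | ordered_stat_items
-- ===== SOURCE A (Python) =====
-- def ordered_stat_items(stats: dict[str, int]) -> list[tuple[str, int]]:
--     preferred_order = [
--         "malicious",
--         "suspicious",
--         "harmless",
--         "undetected",
--         "timeout",
--         "failure",
--         "type-unsupported",
--         "confirmed-timeout",
--     ]
--     seen = set()
--     items: list[tuple[str, int]] = []
--
--     for key in preferred_order:
--         if key in stats:
--             items.append((key, stats[key]))
--             seen.add(key)
--
--     for key in sorted(stats):
--         if key not in seen: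
--             items.append((key, stats[key]))
--
--     return items
-- ===== SOURCE B (Python) =====
-- def ordered_stat_items(stats: dict[str, int]) -> list[tuple[str, int]]:
--     preferred_order = [
--         "malicious",
--         "suspicious",
--         "harmless",
--         "undetected",
--         "timeout",
--         "failure",
--         "type-unsupported",
--         "confirmed-timeout",
--     ]
--     rank = {k: i for i, k in enumerate(preferred_order)}
--     n = len(preferred_order)
--     return sorted(stats.items(), key=lambda kv: (rank.get(kv[0], n), kv[0]))
-- ===== Notes on version B (the rewrite author's own statement) =====
-- stated objective: simpler
-- what changed: Replaces A's preferred-order loop with a seen set plus a second loop over the alphabetically sorted keys by a single stable sort of the items under the composite key (rank-in-preferred-list or 8, then the key name).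
import Mathlib
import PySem

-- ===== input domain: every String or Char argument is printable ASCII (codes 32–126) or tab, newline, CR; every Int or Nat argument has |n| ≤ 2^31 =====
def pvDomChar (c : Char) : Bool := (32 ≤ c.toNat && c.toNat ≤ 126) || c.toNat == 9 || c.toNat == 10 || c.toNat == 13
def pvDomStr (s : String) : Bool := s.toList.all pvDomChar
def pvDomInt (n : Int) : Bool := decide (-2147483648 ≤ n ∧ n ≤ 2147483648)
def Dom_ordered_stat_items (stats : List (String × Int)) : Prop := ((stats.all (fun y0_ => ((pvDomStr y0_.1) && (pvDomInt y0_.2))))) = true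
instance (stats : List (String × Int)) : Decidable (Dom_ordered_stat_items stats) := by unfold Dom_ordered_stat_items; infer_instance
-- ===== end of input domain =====

-- B replaces A's preferred-order loop + seen-set + second sorted loop by ONE stable sort whose
-- composite key (rank-in-preferred-list or 8, then the name) encodes the whole order (objective: simpler).

-- ===== PORT A =====
def preferredOrder : List String :=
  ["malicious", "suspicious", "harmless", "undetected", "timeout", "failure",
   "type-unsupported", "confirmed-timeout"]

-- literal port of A: first loop over preferred_order collecting present keys and a seen set,
-- then a loop over sorted(stats) appending unseen keys.  stats[key] is only read when
-- 'key in stats' holds, so getD's default is never returned.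
def ordered_stat_items (stats : List (String × Int)) : List (String × Int) :=
  let d : PySem.Dict String Int := PySem.Dict.mk stats
  let p : List (String × Int) × PySem.Set String :=
    preferredOrder.foldl (fun acc key =>
      if d.contains key then
        (acc.1 ++ [(key, d.getD key 0)], PySem.Set.add acc.2 key)
      else acc) ([], PySem.Set.empty)
  (PySem.List.sorted d.keys (fun k => k)).foldl
    (fun items key =>
      if PySem.Set.contains p.2 key then items
      else items ++ [(key, d.getD key 0)]) p.1

-- ===== PORT B =====
-- rank = {k: i for i, k in enumerate(preferred_order)}
def rankDict : PySem.Dict String Int :=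
  PySem.Dict.ofList ((PySem.List.enumerate preferredOrder 0).map (fun q => (q.2, q.1)))

-- one stable sort with the tuple key (rank.get(k, n), k)  (sorted2 = Python tuple key)
def ordered_stat_items_alt (stats : List (String × Int)) : List (String × Int) :=
  PySem.List.sorted2 stats
    (fun kv => rankDict.getD kv.1 (preferredOrder.length : Int))
    (fun kv => kv.1)

-- ===== PRECONDITION & SPEC =====
-- Pre_ excludes association lists with duplicate keys: they do not represent any Python dict
-- (A's parameter is dict[str, int], whose keys are unique), so nothing is excluded that the
-- Python function accepts.
def Pre_ordered_stat_items (stats : List (String × Int)) : Prop :=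
  (stats.map Prod.fst).Nodup
instance (stats : List (String × Int)) : Decidable (Pre_ordered_stat_items stats) := by
  unfold Pre_ordered_stat_items; infer_instance

def pvWitness_ordered_stat_items : (List (String × Int)) :=
  [("zebra", 3), ("malicious", 1), ("aardvark", 0), ("harmless", 2)]

def Spec_ordered_stat_items (stats : List (String × Int)) (out : List (String × Int)) : Prop := out = ordered_stat_items_alt stats
instance (stats : List (String × Int)) (out : List (String × Int)) : Decidable (Spec_ordered_stat_items stats out) := by unfold Spec_ordered_stat_items; infer_instance

-- ===== CLAIM (what is proved, stated in full; the proofs are below) =====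
def Claim_equal_ordered_stat_items : Prop := ∀ (stats : List (String × Int)), Dom_ordered_stat_items stats → Pre_ordered_stat_items stats → Spec_ordered_stat_items stats (ordered_stat_items stats)

-- ===== LEMMAS AND PROOFS =====

-- B's composite key, first component (rank.get(k, 8))
def key1 (k : String) : Int := rankDict.getD k (preferredOrder.length : Int)

-- sorted2 with keys k1, k2 IS sorted with the lexicographic key toLex (k1 x, k2 x)
theorem sorted2_eq_sorted_lex (xs : List (String × Int))
    (k1 : (String × Int) → Int) (k2 : (String × Int) → String) :
    PySem.List.sorted2 xs k1 k2 =
      PySem.List.sorted xs (fun x => toLex (k1 x, k2 x)) := by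
  rw [PySem.List.sorted_eq_foldl_insertBy]
  unfold PySem.List.sorted2
  simp only [if_neg (by decide : ¬ (false = true))]
  have hfun : (fun (a b : String × Int) =>
        decide (k1 a < k1 b) || (!decide (k1 b < k1 a) && decide (k2 a < k2 b)))
      = (fun a b => decide (toLex (k1 a, k2 a) < toLex (k1 b, k2 b))) := by
    funext a b
    simp only [Prod.Lex.toLex_lt_toLex]
    by_cases h1 : k1 a < k1 b <;> by_cases h2 : k1 b < k1 a <;>
      by_cases h3 : k2 a < k2 b <;> simp [h1, h2, h3] <;> omega
  rw [hfun]

-- phase-1 loop of A, in closed form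
theorem loop1_closed (d : PySem.Dict String Int) :
    ∀ (l : List String) (acc : List (String × Int) × PySem.Set String),
    l.foldl (fun acc key =>
        if d.contains key then
          (acc.1 ++ [(key, d.getD key 0)], PySem.Set.add acc.2 key)
        else acc) acc
      = (acc.1 ++ (l.filter (fun k => d.contains k)).map (fun k => (k, d.getD k 0)),
         PySem.Set.update acc.2 (l.filter (fun k => d.contains k))) := by
  intro l
  induction l with
  | nil => intro acc; simp [PySem.Set.update_nil]
  | cons x t ih =>
      intro acc
      by_cases hx : d.contains x
      · simp [List.foldl_cons, hx, ih, PySem.Set.update_cons]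
      · simp [List.foldl_cons, hx, ih]

-- phase-2 loop of A, in closed form
theorem loop2_closed (s : PySem.Set String) (d : PySem.Dict String Int)
    (l : List String) (acc : List (String × Int)) :
    l.foldl (fun items key =>
        if PySem.Set.contains s key then items
        else items ++ [(key, d.getD key 0)]) acc
      = acc ++ (l.filter (fun k => !(PySem.Set.contains s k))).map (fun k => (k, d.getD k 0)) := by
  have hfun : (fun (items : List (String × Int)) key =>
        if PySem.Set.contains s key then items else items ++ [(key, d.getD key 0)])
      = (fun items key =>
        if (!(PySem.Set.contains s key)) = true then items ++ [(key, d.getD key 0)] else items) := by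
    funext items key
    by_cases h : PySem.Set.contains s key
    · simp [h]
    · simp [h]
  rw [hfun, PySem.List.foldl_append_if]

theorem key1_of_not_mem {k : String} (h : k ∉ preferredOrder) : key1 k = 8 := by
  have hkeys : rankDict.keys = preferredOrder := by decide
  have h0 : rankDict.get? k = none := by
    rw [PySem.Dict.get?_eq_none_iff_not_mem_keys, hkeys]
    exact h
  rw [key1, PySem.Dict.getD_eq_get?_getD, h0]
  decide

theorem key1_lt_of_mem {k : String} (h : k ∈ preferredOrder) : key1 k < 8 := by
  have : ∀ k ∈ preferredOrder, key1 k < 8 := by decide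
  exact this k h

theorem pref_pairwise_key1 : preferredOrder.Pairwise (fun a b => key1 a < key1 b) := by decide

theorem nodup_pref : preferredOrder.Nodup := by decide

-- ===== VERDICT (by name: the statement is the Claim_ definition above) =====
theorem ordered_stat_items_spec : Claim_equal_ordered_stat_items := by
  intro stats _ hpre
  unfold Spec_ordered_stat_items ordered_stat_items ordered_stat_items_alt
  dsimp only
  set d : PySem.Dict String Int := PySem.Dict.mk stats with hd
  have hkeys : d.keys = stats.map Prod.fst := PySem.Dict.keys_mk stats
  have hnd : d.keys.Nodup := by rw [hkeys]; exact hpre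
  -- closed form of A
  rw [loop1_closed d preferredOrder ([], PySem.Set.empty)]
  set prefIn : List String := preferredOrder.filter (fun k => d.contains k) with hprefIn
  have hseen : PySem.Set.update PySem.Set.empty prefIn = prefIn := by
    rw [PySem.Set.update_empty]
    exact PySem.Set.ofList_eq_self_of_nodup _ (nodup_pref.filter _)
  simp only [hseen, List.nil_append]
  rw [loop2_closed]
  set f : String → String × Int := fun k => (k, d.getD k 0) with hf
  set sk : List String := PySem.List.sorted d.keys (fun k => k) with hsk
  set rest : List String := sk.filter (fun k => !(PySem.Set.contains prefIn k)) with hrest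
  -- membership facts
  have hmem_prefIn : ∀ {k}, k ∈ prefIn ↔ k ∈ preferredOrder ∧ k ∈ d.keys := by
    intro k
    rw [hprefIn, List.mem_filter, PySem.Dict.contains_eq_decide_mem_keys]
    simp
  have hmem_sk : ∀ {k}, k ∈ sk ↔ k ∈ d.keys := by
    intro k; rw [hsk, PySem.List.mem_sorted]
  have hmem_rest : ∀ {k}, k ∈ rest ↔ k ∈ d.keys ∧ k ∉ preferredOrder := by
    intro k
    rw [hrest, List.mem_filter]
    constructor
    · rintro ⟨hks, hnc⟩
      refine ⟨hmem_sk.1 hks, fun hp => ?_⟩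
      have : k ∈ prefIn := hmem_prefIn.2 ⟨hp, hmem_sk.1 hks⟩
      rw [Bool.not_eq_eq_eq_not, Bool.not_true, ← Bool.not_eq_true] at hnc
      exact hnc ((PySem.Set.contains_iff _ _).2 this)
    · rintro ⟨hks, hnp⟩
      refine ⟨hmem_sk.2 hks, ?_⟩
      have : k ∉ prefIn := fun hc => hnp (hmem_prefIn.1 hc).1
      simp [PySem.Set.contains_eq_listContains]
      intro hc
      exact this hc
  -- nodup facts
  have hnd_prefIn : prefIn.Nodup := nodup_pref.filter _
  have hnd_sk : sk.Nodup := ((PySem.List.sorted_perm d.keys (fun k => k) false).nodup_iff).2 hnd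
  have hnd_rest : rest.Nodup := hnd_sk.filter _
  have hdisj : ∀ a ∈ prefIn, a ∉ rest := by
    intro a ha hb
    exact (hmem_rest.1 hb).2 (hmem_prefIn.1 ha).1
  have hnd_cat : (prefIn ++ rest).Nodup := by
    rw [List.nodup_append]
    refine ⟨hnd_prefIn, hnd_rest, ?_⟩
    intro a ha b hb heq
    exact hdisj a ha (heq ▸ hb)
  -- permutation: (prefIn ++ rest) is a permutation of d.keys
  have hperm_keys : (prefIn ++ rest).Perm d.keys := by
    rw [List.perm_ext_iff_of_nodup hnd_cat hnd]
    intro k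
    rw [List.mem_append]
    constructor
    · rintro (h | h)
      · exact (hmem_prefIn.1 h).2
      · exact (hmem_rest.1 h).1
    · intro hk
      by_cases hp : k ∈ preferredOrder
      · exact Or.inl (hmem_prefIn.2 ⟨hp, hk⟩)
      · exact Or.inr (hmem_rest.2 ⟨hk, hp⟩)
  have hitems : stats = d.keys.map f := by
    have := PySem.Dict.items_eq_map_keys d hnd 0
    exact this
  have hperm : ((prefIn ++ rest).map f).Perm stats := by
    rw [hitems]
    exact hperm_keys.map f
  -- strict pairwise order of the composite key on prefIn ++ rest
  have hlt_pref : prefIn.Pairwise (fun a b => key1 a < key1 b) :=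
    pref_pairwise_key1.filter _
  have hle_sk : sk.Pairwise (fun a b : String => a ≤ b) := by
    rw [hsk]
    exact PySem.List.sorted_pairwise d.keys (fun k => k)
  have hlt_rest : rest.Pairwise (fun a b : String => a < b) := by
    have hne : sk.Pairwise (fun a b : String => a ≠ b) := hnd_sk
    have := hle_sk.and hne
    refine (this.filter _).imp ?_
    rintro a b ⟨hle, hne⟩
    exact lt_of_le_of_ne hle hne
  have hpw : (prefIn ++ rest).Pairwise
      (fun a b : String => toLex (key1 a, a) < toLex (key1 b, b)) := by
    rw [List.pairwise_append]
    refine ⟨hlt_pref.imp ?_, ?_, ?_⟩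
    · intro a b h
      exact Prod.Lex.toLex_lt_toLex.2 (Or.inl h)
    · refine List.Pairwise.imp_of_mem ?_ hlt_rest
      intro a b ha hb h
      refine Prod.Lex.toLex_lt_toLex.2 (Or.inr ⟨?_, h⟩)
      rw [key1_of_not_mem (hmem_rest.1 ha).2, key1_of_not_mem (hmem_rest.1 hb).2]
    · intro a ha b hb
      refine Prod.Lex.toLex_lt_toLex.2 (Or.inl ?_)
      have h1 : key1 a < 8 := key1_lt_of_mem (hmem_prefIn.1 ha).1
      have h2 : key1 b = 8 := key1_of_not_mem (hmem_rest.1 hb).2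
      omega
  -- conclude: B's sort returns exactly A's list
  rw [sorted2_eq_sorted_lex]
  have hkeyform : (fun x : String × Int =>
        toLex (rankDict.getD x.1 (preferredOrder.length : Int), x.1))
      = (fun x : String × Int => toLex (key1 x.1, x.1)) := rfl
  rw [hkeyform]
  have hpwmap : ((prefIn ++ rest).map f).Pairwise
      (fun a b : String × Int => toLex (key1 a.1, a.1) < toLex (key1 b.1, b.1)) := by
    rw [List.pairwise_map]
    exact hpw
  rw [PySem.List.sorted_eq_of_perm_of_pairwise_lt stats ((prefIn ++ rest).map f)
        (fun x => toLex (key1 x.1, x.1)) hperm hpwmap]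
  rw [List.map_append]
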